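-- pv_equiv track=rewrite | github.com/layoel/ModeladoFasesCiberAtaques | Controlador.py | calculateCriticality
-- ===== SOURCE A (Python) =====
-- def getCriticidadHA(aP1,aP2, aP3): #alta, medio, baja, muy baja.
--
-- 	if aP1 >= 3:
-- 		criticidad = 1
-- 	elif aP2 >= 3:
-- 		criticidad = 2
-- 	elif aP3 >= 3:
-- 		criticidad = 3
-- 	else:
-- 		criticidad = 4
--
-- 	return criticidad
--
-- def calculateCriticality(allPriorities):
-- 	countP1 = 0
-- 	countP2 = 0
-- 	countP3 = 0
--
-- 	for a in allPriorities:
-- 		if a ==1: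
-- 			countP1 = countP1+1
-- 		if a ==2:
-- 			countP2 = countP2+1
-- 		if a ==3:
-- 			countP3 = countP3+1
--
-- 	criticality=getCriticidadHA(countP1,countP2, countP3)
--
-- 	return criticality
-- ===== SOURCE B (Python) =====
-- def calculateCriticality(allPriorities):
--     s = sorted(allPriorities)
--     for lo, hi in zip(s, s[2:]):
--         if lo == hi and 1 <= lo <= 3:
--             return lo
--     return 4
-- ===== Notes on version B (the rewrite author's own statement) =====
-- stated objective: alternative
-- what changed: Replaces A's single counting pass with three counters and a threshold helper by a sort-then-scan: sort the priorities and return the value of the first window s[i]==s[i+2] with value in 1..3 (a length-3 run in a sorted list is exactly count>=3, and the first run is the smallest level), else 4.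
import Mathlib
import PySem

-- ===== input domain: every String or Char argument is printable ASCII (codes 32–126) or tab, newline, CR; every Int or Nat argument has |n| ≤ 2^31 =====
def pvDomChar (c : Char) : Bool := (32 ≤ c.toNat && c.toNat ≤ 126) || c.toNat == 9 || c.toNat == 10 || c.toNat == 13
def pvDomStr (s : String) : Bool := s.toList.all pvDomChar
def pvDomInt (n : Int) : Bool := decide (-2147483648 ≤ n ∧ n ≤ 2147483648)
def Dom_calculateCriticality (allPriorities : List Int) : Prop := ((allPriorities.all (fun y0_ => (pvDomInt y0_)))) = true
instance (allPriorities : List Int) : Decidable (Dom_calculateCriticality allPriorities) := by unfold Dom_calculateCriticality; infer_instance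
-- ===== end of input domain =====

-- B replaces A's counting pass by a sort-then-scan over length-3 windows (alternative algorithm, not faster).

-- ===== PORT A =====
def getCriticidadHA (aP1 aP2 aP3 : Int) : Int :=
  if aP1 ≥ 3 then 1
  else if aP2 ≥ 3 then 2
  else if aP3 ≥ 3 then 3
  else 4

def calculateCriticality (allPriorities : List Int) : Int :=
  let cs := allPriorities.foldl
    (fun (c : Int × Int × Int) a =>
      let c := if a = 1 then (c.1 + 1, c.2.1, c.2.2) else c
      let c := if a = 2 then (c.1, c.2.1 + 1, c.2.2) else c
      let c := if a = 3 then (c.1, c.2.1, c.2.2 + 1) else c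
      c)
    (0, 0, 0)
  getCriticidadHA cs.1 cs.2.1 cs.2.2

-- ===== PORT B =====
def calculateCriticality_alt (allPriorities : List Int) : Int :=
  let s := PySem.List.sorted allPriorities (fun x => x) false
  -- 'for lo, hi in zip(s, s[2:])' with early return, as find? over the zipped pairs
  match (s.zip (PySem.List.slice s (some 2) none)).find?
      (fun p => p.1 == p.2 && decide (1 ≤ p.1) && decide (p.1 ≤ 3)) with
  | some p => p.1
  | none => 4

-- ===== PRECONDITION & SPEC =====
def Spec_calculateCriticality (allPriorities : List Int) (out : Int) : Prop := out = calculateCriticality_alt allPriorities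
instance (allPriorities : List Int) (out : Int) : Decidable (Spec_calculateCriticality allPriorities out) := by unfold Spec_calculateCriticality; infer_instance

-- ===== CLAIM (what is proved, stated in full; the proofs are below) =====
def Claim_equal_calculateCriticality : Prop := ∀ (allPriorities : List Int), Dom_calculateCriticality allPriorities → Spec_calculateCriticality allPriorities (calculateCriticality allPriorities)

-- ===== LEMMAS AND PROOFS =====

theorem calcCrit_counts (allPriorities : List Int) (c1 c2 c3 : Int) :
    allPriorities.foldl
      (fun (c : Int × Int × Int) a =>
        let c := if a = 1 then (c.1 + 1, c.2.1, c.2.2) else c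
        let c := if a = 2 then (c.1, c.2.1 + 1, c.2.2) else c
        let c := if a = 3 then (c.1, c.2.1, c.2.2 + 1) else c
        c)
      (c1, c2, c3)
    = (c1 + (allPriorities.count 1 : Int),
       c2 + (allPriorities.count 2 : Int),
       c3 + (allPriorities.count 3 : Int)) := by
  induction allPriorities generalizing c1 c2 c3 with
  | nil => simp
  | cons a t ih =>
    simp only [List.foldl_cons, ih]
    by_cases h1 : a = 1 <;> by_cases h2 : a = 2 <;> by_cases h3 : a = 3 <;>
      simp_all <;> omega

-- the scan of B, as the value of the zipped find?
def scanVal (s : List Int) : Int :=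
  match (s.zip (s.drop 2)).find?
      (fun p => p.1 == p.2 && decide (1 ≤ p.1) && decide (p.1 ≤ 3)) with
  | some p => p.1
  | none => 4

-- the scan of a sorted list computes A's threshold value from the counts
theorem getCrit_congr (x1 x2 x3 y1 y2 y3 : Int)
    (h1 : x1 ≥ 3 ↔ y1 ≥ 3) (h2 : x2 ≥ 3 ↔ y2 ≥ 3) (h3 : x3 ≥ 3 ↔ y3 ≥ 3) :
    getCriticidadHA x1 x2 x3 = getCriticidadHA y1 y2 y3 := by
  unfold getCriticidadHA; split_ifs <;> tauto

theorem scanVal_sorted (n : Nat) : ∀ (s : List Int), s.length ≤ n → s.Pairwise (· ≤ ·) →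
    scanVal s = getCriticidadHA (s.count 1 : Int) (s.count 2 : Int) (s.count 3 : Int) := by
  induction n with
  | zero =>
    intro s hlen _
    have : s = [] := List.eq_nil_of_length_eq_zero (Nat.le_zero.mp hlen)
    subst this; decide
  | succ n ih =>
    intro s hlen hsort
    match s with
    | [] => decide
    | [a] =>
      have h1 := List.count_le_length (l := [a]) (a := (1:Int))
      have h2 := List.count_le_length (l := [a]) (a := (2:Int))
      have h3 := List.count_le_length (l := [a]) (a := (3:Int))
      simp at h1 h2 h3
      simp only [scanVal, List.drop, List.zip_nil_right, List.find?_nil]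
      unfold getCriticidadHA
      split_ifs <;> omega
    | [a, b] =>
      have h1 := List.count_le_length (l := [a, b]) (a := (1:Int))
      have h2 := List.count_le_length (l := [a, b]) (a := (2:Int))
      have h3 := List.count_le_length (l := [a, b]) (a := (3:Int))
      simp at h1 h2 h3
      simp only [scanVal, List.drop, List.zip_nil_right, List.find?_nil]
      unfold getCriticidadHA
      split_ifs <;> omega
    | a :: b :: c :: t =>
      -- order facts from sortedness
      have hab : a ≤ b := (List.pairwise_cons.mp hsort).1 b (by simp)
      have hac : a ≤ c := (List.pairwise_cons.mp hsort).1 c (by simp)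
      have hatail : ∀ x ∈ b :: c :: t, a ≤ x := (List.pairwise_cons.mp hsort).1
      have hsort' : (b :: c :: t).Pairwise (· ≤ ·) := (List.pairwise_cons.mp hsort).2
      have hbc : b ≤ c := (List.pairwise_cons.mp hsort').1 c (by simp)
      have hct : ∀ x ∈ t, c ≤ x :=
        (List.pairwise_cons.mp (List.pairwise_cons.mp hsort').2).1
      have hstep : scanVal (a :: b :: c :: t)
          = if a = c ∧ 1 ≤ a ∧ a ≤ 3 then a else scanVal (b :: c :: t) := by
        simp only [scanVal, List.drop_succ_cons, List.drop_zero, List.zip_cons_cons,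
          List.find?_cons]
        by_cases h : a = c ∧ 1 ≤ a ∧ a ≤ 3
        · have hb : (a == c && decide (1 ≤ a) && decide (a ≤ 3)) = true := by
            simp only [Bool.and_eq_true, beq_iff_eq, decide_eq_true_eq]
            exact ⟨⟨h.1, h.2.1⟩, h.2.2⟩
          rw [hb, if_pos h]
        · have hb : (a == c && decide (1 ≤ a) && decide (a ≤ 3)) = false := by
            rcases (by tauto : ¬ a = c ∨ ¬ 1 ≤ a ∨ ¬ a ≤ 3) with h' | h' | h' <;>
              simp [h']
          rw [hb, if_neg h]
      rw [hstep]
      by_cases h : a = c ∧ 1 ≤ a ∧ a ≤ 3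
      · -- a run of three: a = b = c, the smallest qualifying level
        obtain ⟨hacEq, h1a, ha3⟩ := h
        have hbEq : b = a := le_antisymm (hacEq ▸ hbc) hab
        rw [if_pos ⟨hacEq, h1a, ha3⟩]
        have hzero : ∀ l : Int, l < a → (a :: b :: c :: t).count l = 0 := by
          intro l hl
          rw [List.count_eq_zero]
          intro hmem
          rcases List.mem_cons.mp hmem with rfl | hmem'
          · omega
          · exact absurd (hatail l hmem') (by omega)
        have hcnt : 3 ≤ (a :: b :: c :: t).count a := by
          subst hbEq; rw [← hacEq]
          simp [List.count_cons_self]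
        interval_cases a
        · unfold getCriticidadHA
          rw [if_pos (by exact_mod_cast hcnt)]
        · have e1 := hzero 1 (by omega)
          unfold getCriticidadHA
          rw [if_neg (by rw [e1]; norm_num), if_pos (by exact_mod_cast hcnt)]
        · have e1 := hzero 1 (by omega)
          have e2 := hzero 2 (by omega)
          unfold getCriticidadHA
          rw [if_neg (by rw [e1]; norm_num), if_neg (by rw [e2]; norm_num),
            if_pos (by exact_mod_cast hcnt)]
      · rw [if_neg h]
        have hlen' : (b :: c :: t).length ≤ n := by
          simp only [List.length_cons] at hlen ⊢; omega
        rw [ih (b :: c :: t) hlen' hsort']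
        by_cases hin : 1 ≤ a ∧ a ≤ 3
        · -- 1 ≤ a ≤ 3 but a ≠ c: fewer than 3 copies of a on either side
          have hne : a ≠ c := fun e => h ⟨e, hin.1, hin.2⟩
          have hnotin : a ∉ c :: t := by
            intro hmem
            rcases List.mem_cons.mp hmem with rfl | hmem'
            · omega
            · have := hct a hmem'; omega
          have hcr : (b :: c :: t).count a ≤ 1 := by
            rw [show (b :: c :: t) = [b] ++ (c :: t) from rfl, List.count_append,
              List.count_eq_zero.mpr hnotin]
            have := List.count_le_length (l := [b]) (a := a)
            simp at this
            omega
          apply getCrit_congr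
          · by_cases hl : (1:Int) = a
            · subst hl
              rw [List.count_cons_self]
              push_cast
              omega
            · rw [List.count_cons_of_ne (fun e => hl e.symm)]
          · by_cases hl : (2:Int) = a
            · subst hl
              rw [List.count_cons_self]
              push_cast
              omega
            · rw [List.count_cons_of_ne (fun e => hl e.symm)]
          · by_cases hl : (3:Int) = a
            · subst hl
              rw [List.count_cons_self]
              push_cast
              omega
            · rw [List.count_cons_of_ne (fun e => hl e.symm)]
        · -- a outside 1..3: the three counts are unchanged
          have e1 : (a :: b :: c :: t).count 1 = (b :: c :: t).count 1 := by
            rw [List.count_cons_of_ne (by omega)]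
          have e2 : (a :: b :: c :: t).count 2 = (b :: c :: t).count 2 := by
            rw [List.count_cons_of_ne (by omega)]
          have e3 : (a :: b :: c :: t).count 3 = (b :: c :: t).count 3 := by
            rw [List.count_cons_of_ne (by omega)]
          rw [e1, e2, e3]

-- ===== VERDICT (by name: the statement is the Claim_ definition above) =====
theorem calculateCriticality_spec : Claim_equal_calculateCriticality := by
  intro xs _
  unfold Spec_calculateCriticality calculateCriticality calculateCriticality_alt
  simp only [calcCrit_counts, zero_add]
  have hslice : PySem.List.slice (PySem.List.sorted xs (fun x => x) false) (some 2) none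
      = (PySem.List.sorted xs (fun x => x) false).drop 2 := by
    rw [show ((2:Int)) = ((2:Nat):Int) from rfl, PySem.List.slice_from_natCast]
  rw [hslice]
  have hpair : (PySem.List.sorted xs (fun x => x) false).Pairwise (· ≤ ·) :=
    PySem.List.sorted_pairwise xs (fun x => x)
  have hperm : (PySem.List.sorted xs (fun x => x) false).Perm xs :=
    PySem.List.sorted_perm xs (fun x => x) false
  have := scanVal_sorted (PySem.List.sorted xs (fun x => x) false).length
    (PySem.List.sorted xs (fun x => x) false) le_rfl hpair
  unfold scanVal at this
  rw [this, hperm.count_eq 1, hperm.count_eq 2, hperm.count_eq 3]
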